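-- pv_equiv track=rewrite | github.com/CharlotteMontanari/Licence-informatique | Licence1/I23/TP3.py | phoqueit
-- ===== SOURCE A (Python) =====
-- def phoqueit(n):
--     l = []
--     a = ['.']
--     b = ['..','-']
--     if n == 1:
--         return a
--     elif n == 2:
--         return b
--     else:
--         for x in range(3,n+1):
--             l = ['.' + x for x in b]+['-' + x for x in a]
--             a = b
--             b = l
--     return l
-- ===== SOURCE B (Python) =====
-- def phoqueit(n):
--     if n <= 0:
--         return []
--     if n == 1:
--         return ['.']
--     if n == 2:
--         return ['..', '-']
--     return ['.' + s for s in phoqueit(n - 1)] + ['-' + s for s in phoqueit(n - 2)]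
-- ===== Notes on version B (the rewrite author's own statement) =====
-- stated objective: simpler
-- what changed: Replaces A's bottom-up loop over two rolling lists (a,b) with a direct top-down recursion on the same Fibonacci recurrence, concatenating the two recursive results in the same '.'-then-'-' order.
import Mathlib
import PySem

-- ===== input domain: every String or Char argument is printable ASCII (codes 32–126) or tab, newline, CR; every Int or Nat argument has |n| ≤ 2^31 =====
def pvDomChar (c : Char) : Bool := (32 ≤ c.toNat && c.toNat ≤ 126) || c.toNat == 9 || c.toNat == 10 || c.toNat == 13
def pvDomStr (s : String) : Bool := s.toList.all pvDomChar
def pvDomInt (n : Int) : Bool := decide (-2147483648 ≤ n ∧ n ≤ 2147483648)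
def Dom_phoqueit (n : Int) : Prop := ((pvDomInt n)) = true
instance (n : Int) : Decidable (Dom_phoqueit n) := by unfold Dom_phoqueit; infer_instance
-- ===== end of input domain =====

-- B replaces A's bottom-up loop over two rolling lists with a direct top-down recursion
-- on the same Fibonacci recurrence (objective: simpler).


-- ===== PORT A =====
-- one loop iteration over state (l, a, b)
def phoqueitStep (st : List String × List String × List String) (_ : Int) :
    List String × List String × List String :=
  let l := st.2.2.map (fun x => "." ++ x) ++ st.2.1.map (fun x => "-" ++ x)
  (l, st.2.2, l)

def phoqueit (n : Int) : List String :=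
  let l : List String := []
  let a : List String := ["."]
  let b : List String := ["..", "-"]
  if n = 1 then a
  else if n = 2 then b
  else ((PySem.List.pyRange 3 (n + 1) 1).foldl phoqueitStep (l, a, b)).1

-- ===== PORT B =====
def phoqueit_alt (n : Int) : List String :=
  if n ≤ 0 then []
  else if n = 1 then ["."]
  else if n = 2 then ["..", "-"]
  else (phoqueit_alt (n - 1)).map (fun s => "." ++ s) ++
       (phoqueit_alt (n - 2)).map (fun s => "-" ++ s)
termination_by n.toNat
decreasing_by all_goals omega

-- ===== PRECONDITION & SPEC =====
def Spec_phoqueit (n : Int) (out : List String) : Prop := out = phoqueit_alt n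
instance (n : Int) (out : List String) : Decidable (Spec_phoqueit n out) := by unfold Spec_phoqueit; infer_instance

-- ===== CLAIM (what is proved, stated in full; the proofs are below) =====
def Claim_equal_phoqueit : Prop := ∀ (n : Int), Dom_phoqueit n → Spec_phoqueit n (phoqueit n)

-- ===== LEMMAS AND PROOFS =====

lemma alt_rec (n : Int) (h : 3 ≤ n) :
    phoqueit_alt n = (phoqueit_alt (n - 1)).map (fun s => "." ++ s) ++
                     (phoqueit_alt (n - 2)).map (fun s => "-" ++ s) := by
  rw [phoqueit_alt]
  have h0 : ¬ n ≤ 0 := by omega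
  have h1 : n ≠ 1 := by omega
  have h2 : n ≠ 2 := by omega
  simp [h0, h1, h2]

lemma alt_one : phoqueit_alt 1 = ["."] := by rw [phoqueit_alt]; norm_num

lemma alt_two : phoqueit_alt 2 = ["..", "-"] := by rw [phoqueit_alt]; norm_num

lemma loop_inv (m : Nat) :
    (PySem.List.pyRange 3 ((m : Int) + 4) 1).foldl phoqueitStep ([], ["."], ["..", "-"]) =
      (phoqueit_alt ((m : Int) + 3), phoqueit_alt ((m : Int) + 2), phoqueit_alt ((m : Int) + 3)) := by
  induction m with
  | zero =>
      push_cast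
      rw [show (4 : Int) = 3 + 1 by norm_num, PySem.List.pyRange_one_singleton]
      rw [alt_rec 3 (by norm_num), show (3:Int) - 1 = 2 by ring, show (3:Int) - 2 = 1 by ring,
        alt_two, alt_one]
      norm_num [phoqueitStep]
  | succ k ih =>
      push_cast
      have hsplit : PySem.List.pyRange 3 ((k : Int) + 1 + 4) 1 =
          PySem.List.pyRange 3 ((k : Int) + 4) 1 ++ [(k : Int) + 4] := by
        have := PySem.List.pyRange_one_succ_right (a := 3) (b := (k : Int) + 4) (by omega)
        simpa [show (k : Int) + 4 + 1 = (k : Int) + 1 + 4 by ring] using this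
      rw [hsplit, List.foldl_append, ih]
      have : phoqueitStep (phoqueit_alt ((k : Int) + 3), phoqueit_alt ((k : Int) + 2),
          phoqueit_alt ((k : Int) + 3)) ((k : Int) + 4) =
          (phoqueit_alt ((k : Int) + 4), phoqueit_alt ((k : Int) + 3), phoqueit_alt ((k : Int) + 4)) := by
        rw [phoqueitStep]
        rw [alt_rec ((k : Int) + 4) (by omega),
          show (k : Int) + 4 - 1 = (k : Int) + 3 by ring,
          show (k : Int) + 4 - 2 = (k : Int) + 2 by ring]
      simp only [List.foldl_cons, List.foldl_nil, this]
      rw [show (k : Int) + 1 + 3 = (k : Int) + 4 by ring, show (k : Int) + 1 + 2 = (k : Int) + 3 by ring]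
  
-- ===== VERDICT (by name: the statement is the Claim_ definition above) =====
theorem phoqueit_spec : Claim_equal_phoqueit := by
  intro n _
  unfold Spec_phoqueit phoqueit
  by_cases h1 : n = 1
  · subst h1; simp; rw [phoqueit_alt]; norm_num
  · by_cases h2 : n = 2
    · subst h2; simp; rw [phoqueit_alt]; norm_num
    · simp only [h1, h2, if_false]
      by_cases h3 : 3 ≤ n
      · have hm : n = ((n - 3).toNat : Int) + 3 := by omega
        have := loop_inv (n - 3).toNat
        rw [show ((n - 3).toNat : Int) + 4 = n + 1 by omega] at this
        rw [this]
        simp only []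
        rw [show ((n - 3).toNat : Int) + 3 = n by omega]
      · have hn0 : n ≤ 0 := by omega
        rw [PySem.List.pyRange_one_eq_nil (by omega)]
        simp
        rw [phoqueit_alt]
        simp [hn0]
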